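-- pv_equiv track=rewrite | github.com/thom-heinrich/twinr | src/twinr/integrations/email/profiles.py | _normalize_lookup_token
-- ===== SOURCE A (Python) =====
-- def _coerce_text(raw: str | bytes | None) -> str:
--     """Convert text-like input to ``str`` without throwing on bytes."""
--
--     if raw is None:
--         return ""
--     if isinstance(raw, bytes):
--         return raw.decode("utf-8", errors="ignore")
--     if isinstance(raw, str):
--         return raw
--     return str(raw)
--
-- def _normalize_lookup_token(raw: str | bytes | None) -> str:
--     """Normalize profile IDs, aliases, and free-form provider selections."""
--
--     value = _coerce_text(raw).strip().lower()
--     if not value: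
--         return ""
--     normalized = []
--     last_was_separator = False
--     for char in value:
--         if char.isalnum():
--             normalized.append(char)
--             last_was_separator = False
--             continue
--         if char in {"@", "."}:
--             normalized.append(char)
--             last_was_separator = False
--             continue
--         if not last_was_separator:
--             normalized.append("_")
--             last_was_separator = True
--     return "".join(normalized).strip("_")
-- ===== SOURCE B (Python) =====
-- def _coerce_text(raw):
--     """Convert text-like input to ``str`` without throwing on bytes."""
--     if raw is None:
--         return ""
--     if isinstance(raw, bytes):
--         return raw.decode("utf-8", errors="ignore")
--     if isinstance(raw, str):
--         return raw
--     return str(raw)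
--
--
-- def _normalize_lookup_token(raw):
--     """Normalize profile IDs, aliases, and free-form provider selections.
--
--     Blank out every separator character (anything not alphanumeric and not
--     '@' or '.'), then let str.split() collapse the runs and drop the ends,
--     and rejoin the words with single underscores.
--     """
--     value = _coerce_text(raw).strip().lower()
--     spaced = "".join(c if (c.isalnum() or c in "@.") else " " for c in value)
--     return "_".join(spaced.split())
-- ===== Notes on version B (the rewrite author's own statement) =====
-- stated objective: simpler
-- what changed: Replaces A's stateful loop (append-or-collapse with a last_was_separator flag, then a final strip of underscores) by a three-step pipeline: blank out every separator character, let str.split() collapse runs and drop the ends, and rejoin the words with underscores.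
import Mathlib
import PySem

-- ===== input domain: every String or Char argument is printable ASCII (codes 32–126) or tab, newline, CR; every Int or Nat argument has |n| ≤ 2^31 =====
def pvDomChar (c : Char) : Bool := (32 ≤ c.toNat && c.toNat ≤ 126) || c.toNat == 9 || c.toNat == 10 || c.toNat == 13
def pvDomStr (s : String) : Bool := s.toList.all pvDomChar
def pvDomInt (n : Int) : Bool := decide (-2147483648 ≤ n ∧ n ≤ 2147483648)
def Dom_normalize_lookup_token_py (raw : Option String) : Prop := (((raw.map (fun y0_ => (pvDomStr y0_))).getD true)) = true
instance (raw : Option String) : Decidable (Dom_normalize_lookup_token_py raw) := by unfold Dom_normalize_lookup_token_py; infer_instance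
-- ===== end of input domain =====

-- B replaces A's stateful separator-collapsing loop by blanking out separators, splitting on whitespace and rejoining with '_' (simpler/idiomatic); same return value.


-- ===== PORT A =====
-- _coerce_text: on an Option String argument only the None / str branches are reachable
def pvCoerceText (raw : Option String) : String :=
  match raw with
  | none => ""
  | some s => s

def normalize_lookup_token_py (raw : Option String) : String :=
  let value := PySem.Chars.lower (PySem.Chars.strip (pvCoerceText raw).toList)
  if value.isEmpty then ""
  else
    let st := value.foldl (fun (st : List Char × Bool) char =>
      if PySem.Chars.isalnum char then (st.1 ++ [char], false)
      else if char = '@' ∨ char = '.' then (st.1 ++ [char], false)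
      else if !st.2 then (st.1 ++ ['_'], true) else st) ([], false)
    String.mk (PySem.Chars.stripChars st.1 ['_'])

-- ===== PORT B =====
def normalize_lookup_token_py_alt (raw : Option String) : String :=
  let value := PySem.Chars.lower (PySem.Chars.strip (pvCoerceText raw).toList)
  let spaced := value.map (fun c => if PySem.Chars.isalnum c || ['@', '.'].contains c then c else ' ')
  String.mk (PySem.Chars.join ['_'] (PySem.Chars.split₀ spaced))

-- ===== PRECONDITION & SPEC =====
def Spec_normalize_lookup_token_py (raw : Option String) (out : String) : Prop := out = normalize_lookup_token_py_alt raw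
instance (raw : Option String) (out : String) : Decidable (Spec_normalize_lookup_token_py raw out) := by unfold Spec_normalize_lookup_token_py; infer_instance

-- ===== CLAIM (what is proved, stated in full; the proofs are below) =====
def Claim_equal_normalize_lookup_token_py : Prop := ∀ (raw : Option String), Dom_normalize_lookup_token_py raw → Spec_normalize_lookup_token_py raw (normalize_lookup_token_py raw)

-- ===== LEMMAS AND PROOFS =====

-- the keep/separator test both programs apply to each character
def pvKeep (c : Char) : Bool := PySem.Chars.isalnum c || c == '@' || c == '.'

-- A's loop, as front-to-back recursion over the characters
def pvNormA : List Char → Bool → List Char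
  | [], _ => []
  | c :: r, flag =>
    if pvKeep c then c :: pvNormA r false
    else if !flag then '_' :: pvNormA r true
    else pvNormA r true

-- the maximal runs of kept characters
def pvWords : List Char → List (List Char)
  | [] => []
  | c :: r =>
    if pvKeep c then (c :: r.takeWhile pvKeep) :: pvWords (r.dropWhile pvKeep)
    else pvWords r
  termination_by l => l.length
  decreasing_by
  · exact Nat.lt_succ_of_le (List.length_dropWhile_le _ _)
  · exact Nat.lt_succ_self _

-- the maximal runs of non-whitespace characters (what split() produces)
def pvWordsS : List Char → List (List Char)
  | [] => []
  | c :: r =>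
    if PySem.Chars.isspace c then pvWordsS r
    else (c :: r.takeWhile (fun x => !PySem.Chars.isspace x)) :: pvWordsS (r.dropWhile (fun x => !PySem.Chars.isspace x))
  termination_by l => l.length
  decreasing_by
  · exact Nat.lt_succ_self _
  · exact Nat.lt_succ_of_le (List.length_dropWhile_le _ _)

-- words joined by single underscores
def pvMid : List (List Char) → List Char
  | [] => []
  | [w] => w
  | w :: w' :: ws => w ++ '_' :: pvMid (w' :: ws)

-- B's per-character replacement
def pvRepl (c : Char) : Char := if pvKeep c then c else ' '

def pvSepEnd (l : List Char) : Bool :=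
  match l.getLast? with
  | none => false
  | some c => !pvKeep c

def pvLead (l : List Char) : List Char :=
  match l with
  | [] => []
  | c :: _ => if pvKeep c then [] else ['_']

def pvTail (l : List Char) : List Char :=
  if !(pvWords l).isEmpty && pvSepEnd l then ['_'] else []

lemma pvKeep_eq_port (c : Char) :
    (PySem.Chars.isalnum c || ['@', '.'].contains c) = pvKeep c := by
  simp only [pvKeep, List.contains_cons, List.contains_nil, Bool.or_false, Bool.or_assoc]

lemma charBound {a c : Char} (h : a ≤ c) : a.toNat ≤ c.toNat := h

lemma pvKeep_not_space {c : Char} (h : pvKeep c = true) : PySem.Chars.isspace c = false := by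
  have hb : 46 ≤ c.toNat ∧ c.toNat ≤ 122 := by
    simp only [pvKeep, PySem.Chars.isalnum, PySem.Chars.isalpha, PySem.Chars.isdigit,
      PySem.Chars.isupper, PySem.Chars.islower, Bool.or_eq_true, Bool.and_eq_true,
      decide_eq_true_eq, beq_iff_eq] at h
    rcases h with ((((h|h)|h)|h)|h)
    · exact ⟨le_trans (by decide) (charBound h.1), le_trans (charBound h.2) (by decide)⟩
    · exact ⟨le_trans (by decide) (charBound h.1), le_trans (charBound h.2) (by decide)⟩
    · exact ⟨le_trans (by decide) (charBound h.1), le_trans (charBound h.2) (by decide)⟩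
    · subst h; decide
    · subst h; decide
  simp only [PySem.Chars.isspace, Bool.or_eq_false_iff, Bool.and_eq_false_iff,
    decide_eq_false_iff_not]
  omega

lemma pvKeep_ne_underscore {c : Char} (h : pvKeep c = true) : c ≠ '_' := by
  rintro rfl; revert h; decide

lemma pvFoldA (l : List Char) (acc : List Char) (flag : Bool) :
    (l.foldl (fun (st : List Char × Bool) char =>
      if PySem.Chars.isalnum char then (st.1 ++ [char], false)
      else if char = '@' ∨ char = '.' then (st.1 ++ [char], false)
      else if !st.2 then (st.1 ++ ['_'], true) else st) (acc, flag)).1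
    = acc ++ pvNormA l flag := by
  induction l generalizing acc flag with
  | nil => simp [pvNormA]
  | cons c r ih =>
    simp only [List.foldl_cons]
    by_cases hk : pvKeep c = true
    · have hcases : PySem.Chars.isalnum c = true ∨ c = '@' ∨ c = '.' := by
        simpa [pvKeep, or_assoc] using hk
      rw [show (if PySem.Chars.isalnum c = true then (acc ++ [c], false)
          else if c = '@' ∨ c = '.' then (acc ++ [c], false)
          else if (!flag) = true then (acc ++ ['_'], true) else (acc, flag)) = (acc ++ [c], false) by
        rcases hcases with h | h
        · simp [h]
        · have : PySem.Chars.isalnum c = true ∨ ¬ PySem.Chars.isalnum c = true := em _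
          rcases this with h2 | h2 <;> simp [h2, h]]
      rw [ih]
      simp [pvNormA, hk, List.append_assoc]
    · have hna : ¬ PySem.Chars.isalnum c = true := by
        intro h; exact hk (by simp [pvKeep, h])
      have hat : ¬ (c = '@' ∨ c = '.') := by
        intro h; apply hk; rcases h with h | h <;> simp [pvKeep, h]
      cases flag with
      | false =>
        simp only [hna, if_false, hat, Bool.not_false, if_pos rfl, ih]
        simp [pvNormA, hk, List.append_assoc]
      | true =>
        simp only [hna, hat, if_false, Bool.not_true, ih]
        simp [pvNormA, hk]


lemma pvSplitGo (s cur : List Char) (accl : List (List Char)) :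
    PySem.Chars.split₀.go s cur accl
    = accl.reverse ++ (if cur.isEmpty then pvWordsS s
        else (cur.reverse ++ s.takeWhile (fun x => !PySem.Chars.isspace x))
              :: pvWordsS (s.dropWhile (fun x => !PySem.Chars.isspace x))) := by
  induction s generalizing cur accl with
  | nil =>
    cases cur with
    | nil => simp [PySem.Chars.split₀.go, pvWordsS]
    | cons a as => simp [PySem.Chars.split₀.go, pvWordsS]
  | cons c r ih =>
    by_cases hs : PySem.Chars.isspace c = true
    · cases cur with
      | nil =>
        rw [PySem.Chars.split₀.go]
        simp only [hs, if_true, List.isEmpty_nil, ih]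
        simp [pvWordsS, hs]
      | cons a as =>
        rw [PySem.Chars.split₀.go]
        simp only [hs, if_true, List.isEmpty_cons, ih]
        simp [pvWordsS, hs, List.takeWhile, List.dropWhile]
    · rw [PySem.Chars.split₀.go]
      simp only [hs, if_false, ih]
      cases cur with
      | nil => simp [pvWordsS, hs, List.takeWhile, List.dropWhile]
      | cons a as => simp [pvWordsS, hs, List.takeWhile, List.dropWhile]

lemma pvSplit_eq (s : List Char) : PySem.Chars.split₀ s = pvWordsS s := by
  rw [PySem.Chars.split₀, pvSplitGo]
  simp

lemma pvWordsS_map_repl (l : List Char) : pvWordsS (l.map pvRepl) = pvWords l := by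
  induction l using pvWords.induct with
  | case1 => simp [pvWordsS, pvWords]
  | case2 c r hk ih =>
    have hrepl : pvRepl c = c := by simp [pvRepl, hk]
    have hs : PySem.Chars.isspace c = false := pvKeep_not_space hk
    rw [pvWords, if_pos hk, List.map_cons, pvWordsS, hrepl, if_neg (by simp [hs])]
    have hpt : ∀ x, (!PySem.Chars.isspace (pvRepl x)) = pvKeep x := by
      intro x
      by_cases h : pvKeep x = true
      · simp [pvRepl, h, pvKeep_not_space h]
      · simp [pvRepl, h]; decide
    have htw : List.takeWhile (fun x => !PySem.Chars.isspace x) (r.map pvRepl)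
        = List.takeWhile pvKeep r := by
      rw [List.takeWhile_map]
      have : (fun x => !PySem.Chars.isspace (pvRepl x)) = pvKeep := funext hpt
      rw [show ((fun x => !PySem.Chars.isspace x) ∘ pvRepl) = pvKeep by funext x; simpa using hpt x]
      have : ∀ x ∈ List.takeWhile pvKeep r, pvRepl x = x := by
        intro x hx
        simp [pvRepl, List.mem_takeWhile_imp hx]
      rw [List.map_congr_left this]; simp
    have hdw : List.dropWhile (fun x => !PySem.Chars.isspace x) (r.map pvRepl)
        = (List.dropWhile pvKeep r).map pvRepl := by
      rw [List.dropWhile_map]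
      rw [show ((fun x => !PySem.Chars.isspace x) ∘ pvRepl) = pvKeep by funext x; simpa using hpt x]
    rw [htw, hdw, ih]
  | case3 c r hk ih =>
    have hrepl : pvRepl c = ' ' := by simp [pvRepl, hk]
    rw [pvWords, if_neg (by simp [hk]), List.map_cons, pvWordsS, hrepl, if_pos (by decide)]
    exact ih


lemma pvWords_nil_of_all_sep {l : List Char} (h : pvWords l = []) :
    ∀ x ∈ l, pvKeep x = false := by
  induction l with
  | nil => simp
  | cons c r ih =>
    rw [pvWords] at h
    by_cases hk : pvKeep c = true
    · simp [hk] at h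
    · intro x hx
      rcases List.mem_cons.mp hx with rfl | hx
      · simpa using hk
      · exact ih (by simpa [hk] using h) x hx

lemma pvWords_sound (l : List Char) :
    ∀ w ∈ pvWords l, w ≠ [] ∧ ∀ x ∈ w, pvKeep x = true := by
  induction l using pvWords.induct with
  | case1 => simp [pvWords]
  | case2 c r hk ih =>
    rw [pvWords, if_pos hk]
    intro w hw
    rcases List.mem_cons.mp hw with rfl | hw
    · refine ⟨by simp, ?_⟩
      intro x hx
      rcases List.mem_cons.mp hx with rfl | hx
      · exact hk
      · exact List.mem_takeWhile_imp hx
    · exact ih w hw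
  | case3 c r hk ih =>
    rw [pvWords, if_neg hk]
    exact ih

lemma pvNormA_false (l : List Char) : pvNormA l false = pvLead l ++ pvNormA l true := by
  cases l with
  | nil => simp [pvNormA, pvLead]
  | cons c r =>
    by_cases hk : pvKeep c = true
    · simp [pvNormA, pvLead, hk]
    · simp [pvNormA, pvLead, hk]

lemma pvWords_cons_sep {c : Char} {r : List Char} (hk : pvKeep c = false) :
    pvWords (c :: r) = pvWords r := by
  rw [pvWords, if_neg (by simp [hk])]

lemma pvSepEnd_cons {c : Char} {d : Char} {r : List Char} :
    pvSepEnd (c :: d :: r) = pvSepEnd (d :: r) := by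
  simp [pvSepEnd]

lemma pvNormA_true (l : List Char) : pvNormA l true = pvMid (pvWords l) ++ pvTail l := by
  induction l with
  | nil => simp [pvNormA, pvWords, pvMid, pvTail]
  | cons c r ih =>
    by_cases hk : pvKeep c = true
    · rw [pvNormA, if_pos hk, pvNormA_false, ih]
      rw [pvWords, if_pos hk]
      cases r with
      | nil =>
        simp [pvWords, pvMid, pvTail, pvLead, pvSepEnd, hk]
      | cons d r' =>
        by_cases hd : pvKeep d = true
        · -- run continues
          rw [List.takeWhile_cons_of_pos hd, List.dropWhile_cons_of_pos hd]
          rw [show pvWords (d :: r') = (d :: r'.takeWhile pvKeep) :: pvWords (r'.dropWhile pvKeep) by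
            rw [pvWords, if_pos hd]]
          rw [pvLead]
          simp only [hd, if_true, List.nil_append]
          rw [show ∀ w ws, pvMid ((c :: w) :: ws) = c :: pvMid (w :: ws) from ?_]
          · rw [pvTail, pvTail]
            rw [show pvWords (c :: d :: r') = (c :: (d::r').takeWhile pvKeep) :: pvWords ((d::r').dropWhile pvKeep) by
              rw [pvWords, if_pos hk]]
            rw [show pvWords (d :: r') = (d :: r'.takeWhile pvKeep) :: pvWords (r'.dropWhile pvKeep) by
              rw [pvWords, if_pos hd]]
            rw [pvSepEnd_cons]
            simp [List.takeWhile_cons_of_pos hd, List.dropWhile_cons_of_pos hd]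
          · intro w ws
            cases ws with
            | nil => simp [pvMid]
            | cons a as => simp [pvMid]
        · -- run ends right after c
          rw [List.takeWhile_cons_of_neg (by simp [hd]), List.dropWhile_cons_of_neg (by simp [hd])]
          rw [pvLead]
          simp only [hd, if_false, if_neg (by simp [hd] : ¬ pvKeep d = true)]
          have hne : pvWords (c :: d :: r') = (c :: (d::r').takeWhile pvKeep) :: pvWords ((d::r').dropWhile pvKeep) := by
            rw [pvWords, if_pos hk]
          rcases hws : pvWords (d :: r') with _ | ⟨w, ws⟩
          · -- no more words
            have hall : ∀ x ∈ d :: r', pvKeep x = false := pvWords_nil_of_all_sep hws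
            have hend : pvSepEnd (c :: d :: r') = true := by
              rw [pvSepEnd_cons]
              have hmem := List.getLast_mem (l := d :: r') (by simp)
              have := hall _ hmem
              simp [pvSepEnd, List.getLast?_eq_getLast (l := d :: r') (by simp), this]
            rw [pvTail, pvTail, hws, hend]
            simp [pvMid, hne]
          · -- more words follow
            rw [pvTail, pvTail, hws, pvSepEnd_cons]
            simp only [List.isEmpty_cons, Bool.not_false, Bool.true_and, hne]
            rw [show pvMid ([c] :: w :: ws) = [c] ++ '_' :: pvMid (w :: ws) from rfl]
            cases h : pvSepEnd (d :: r') <;> simp [pvMid]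
    · have h1 : pvNormA (c :: r) true = pvNormA r true := by
        rw [pvNormA]; simp [hk]
      rw [h1, ih, pvWords_cons_sep (c := c) (by simpa using hk)]
      cases r with
      | nil =>
        simp [pvWords, pvMid, pvTail, hk]
      | cons d r' =>
        rw [pvTail, pvTail, pvSepEnd_cons, pvWords_cons_sep (c := c) (by simpa using hk)]


lemma pvMid_head {w : List Char} {ws : List (List Char)}
    (h : ∀ u ∈ (w :: ws), u ≠ [] ∧ ∀ x ∈ u, pvKeep x = true) :
    ∃ c m, pvMid (w :: ws) = c :: m ∧ pvKeep c = true := by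
  obtain ⟨hne, hall⟩ := h w (by simp)
  rcases w with _ | ⟨c, w'⟩
  · exact absurd rfl hne
  · refine ⟨c, ?_, ?_, hall c (by simp)⟩
    · exact w' ++ (match ws with | [] => [] | w'' :: ws' => '_' :: pvMid (w'' :: ws'))
    · cases ws with
      | nil => simp [pvMid]
      | cons a as => simp [pvMid]

lemma pvMid_last {w : List Char} {ws : List (List Char)}
    (h : ∀ u ∈ (w :: ws), u ≠ [] ∧ ∀ x ∈ u, pvKeep x = true) :
    ∃ m d, pvMid (w :: ws) = m ++ [d] ∧ pvKeep d = true := by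
  induction ws generalizing w with
  | nil =>
    obtain ⟨hne, hall⟩ := h w (by simp)
    rcases List.eq_nil_or_concat w with rfl | ⟨m, d, rfl⟩
    · exact absurd rfl hne
    · exact ⟨m, d, by simp [pvMid], hall d (by simp)⟩
  | cons w' ws' ih =>
    obtain ⟨m, d, hmd, hd⟩ := ih (w := w') (fun u hu => h u (List.mem_cons_of_mem _ hu))
    exact ⟨w ++ '_' :: m, d, by simp [pvMid, hmd], hd⟩

lemma pvStripCore (m lead tail : List Char)
    (hl : lead = [] ∨ lead = ['_']) (ht : tail = [] ∨ tail = ['_'])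
    {c : Char} {m₁ : List Char} (hm : m = c :: m₁) (hc : pvKeep c = true)
    {m₂ : List Char} {d : Char} (hm2 : m = m₂ ++ [d]) (hd : pvKeep d = true) :
    PySem.Chars.stripChars (lead ++ m ++ tail) ['_'] = m := by
  rw [PySem.Chars.stripChars]
  have h1 : List.dropWhile (fun x => ['_'].contains x) (lead ++ m ++ tail) = m ++ tail := by
    rcases hl with rfl | rfl
    · rw [List.nil_append, hm, List.cons_append, List.dropWhile_cons_of_neg (by simp; exact pvKeep_ne_underscore hc)]
    · rw [show ['_'] ++ m ++ tail = '_' :: (m ++ tail) by simp,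
        List.dropWhile_cons_of_pos (by decide), hm, List.cons_append,
        List.dropWhile_cons_of_neg (by simp; exact pvKeep_ne_underscore hc)]
  rw [h1]
  have h2 : List.dropWhile (fun x => ['_'].contains x) ((m ++ tail).reverse) = m.reverse := by
    have hmr : m.reverse = d :: m₂.reverse := by simp [hm2]
    rcases ht with rfl | rfl
    · rw [List.append_nil, hmr, List.dropWhile_cons_of_neg (by simp; exact pvKeep_ne_underscore hd), ← hmr]
    · rw [List.reverse_append, show (['_'] : List Char).reverse = ['_'] from rfl,
        List.singleton_append, List.dropWhile_cons_of_pos (by decide), hmr,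
        List.dropWhile_cons_of_neg (by simp; exact pvKeep_ne_underscore hd), ← hmr]
  rw [h2, List.reverse_reverse]


lemma pvJoin_eq_mid (ws : List (List Char)) : PySem.Chars.join ['_'] ws = pvMid ws := by
  induction ws with
  | nil => simp [PySem.Chars.join, pvMid, List.intercalate]
  | cons w ws ih =>
    cases ws with
    | nil => simp [PySem.Chars.join, pvMid, List.intercalate]
    | cons w' ws' =>
      rw [pvMid, ← ih]
      simp [PySem.Chars.join, List.intercalate, List.intersperse]


lemma pvStrip_full (l : List Char) :
    PySem.Chars.stripChars (pvNormA l false) ['_'] = pvMid (pvWords l) := by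
  have hsplit : pvNormA l false = pvLead l ++ pvMid (pvWords l) ++ pvTail l := by
    rw [pvNormA_false, pvNormA_true, List.append_assoc]
  have hlead : pvLead l = [] ∨ pvLead l = ['_'] := by
    rcases l with _ | ⟨c, r⟩
    · exact Or.inl rfl
    · rw [pvLead]; split <;> simp
  have htail : pvTail l = [] ∨ pvTail l = ['_'] := by
    rw [pvTail]; split <;> simp
  rcases hws : pvWords l with _ | ⟨w, ws⟩
  · have hmid : pvMid (pvWords l) = [] := by rw [hws]; rfl
    have htl : pvTail l = [] := by rw [pvTail, hws]; simp
    rw [hsplit, hmid, htl, List.append_nil, List.append_nil]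
    rcases hlead with h | h <;> rw [h] <;> decide
  · have hsound := pvWords_sound l
    rw [hws] at hsound
    obtain ⟨c, m₁, hhead, hc⟩ := pvMid_head hsound
    obtain ⟨m₂, d, hlast, hd⟩ := pvMid_last hsound
    rw [hsplit, hws]
    exact pvStripCore (pvMid (w :: ws)) (pvLead l) (pvTail l) hlead htail hhead hc hlast hd

-- ===== VERDICT (by name: the statement is the Claim_ definition above) =====
theorem normalize_lookup_token_py_spec : Claim_equal_normalize_lookup_token_py := by
  intro raw _
  unfold Spec_normalize_lookup_token_py normalize_lookup_token_py normalize_lookup_token_py_alt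
  set value := PySem.Chars.lower (PySem.Chars.strip (pvCoerceText raw).toList) with hv
  have hmap : value.map (fun c => if PySem.Chars.isalnum c || ['@', '.'].contains c then c else ' ')
      = value.map pvRepl := by
    apply List.map_congr_left
    intro x _
    rw [pvRepl, pvKeep_eq_port]
  have hB : PySem.Chars.join ['_']
      (PySem.Chars.split₀ (value.map (fun c => if PySem.Chars.isalnum c || ['@', '.'].contains c then c else ' ')))
      = pvMid (pvWords value) := by
    rw [hmap, pvSplit_eq, pvWordsS_map_repl, pvJoin_eq_mid]
  by_cases hemp : value.isEmpty = true
  · have : value = [] := List.isEmpty_iff.mp hemp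
    simp only [hemp, if_true, hB, this]
    rfl
  · simp only [hemp, if_false, hB, pvFoldA]
    rw [List.nil_append, pvStrip_full]
    simp
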